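-- pv_equiv track=rewrite | github.com/RHIT-CSSE/csse490-algorithmic-game-theory | labs/lab04-comp-social-choice/tactical_voting.py | is_better_outcome
-- ===== SOURCE A (Python) =====
-- from typing import List, Dict, Tuple, Callable
--
-- def is_better_outcome(true_ranking: List[str],
--                      original_winners: List[str],
--                      new_winners: List[str]) -> bool:
--     """
--     Determine if the new outcome is better for a voter than the original.
--
--     Args:
--         true_ranking: Voter's true preference ranking
--         original_winners: Winners under honest voting
--         new_winners: Winners under tactical voting
--
--     Returns:
--         True if new outcome is strictly better for this voter
--
--     DO NOT MODIFY THIS FUNCTION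
--     """
--     # Find highest-ranked candidate in original winners
--     original_best_position = min(
--         true_ranking.index(w) for w in original_winners if w in true_ranking
--     )
--
--     # Find highest-ranked candidate in new winners
--     new_best_position = min(
--         true_ranking.index(w) for w in new_winners if w in true_ranking
--     )
--
--     # Better if a more-preferred candidate wins (lower position index)
--     return new_best_position < original_best_position
-- ===== SOURCE B (Python) =====
-- def is_better_outcome(true_ranking, original_winners, new_winners):
--     def best_position(winners):
--         members = set(winners)
--         for position, candidate in enumerate(true_ranking):
--             if candidate in members:
--                 return position
--         raise ValueError("min() arg is an empty sequence")
--
--     original_best = best_position(original_winners)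
--     new_best = best_position(new_winners)
--     return new_best < original_best
-- ===== Notes on version B (the rewrite author's own statement) =====
-- stated objective: faster
-- what changed: Instead of looking up each winner's index in the ranking and taking the min, B builds a set of the winners once and walks the ranking in preference order, returning at the first candidate that is a winner.
import Mathlib
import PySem

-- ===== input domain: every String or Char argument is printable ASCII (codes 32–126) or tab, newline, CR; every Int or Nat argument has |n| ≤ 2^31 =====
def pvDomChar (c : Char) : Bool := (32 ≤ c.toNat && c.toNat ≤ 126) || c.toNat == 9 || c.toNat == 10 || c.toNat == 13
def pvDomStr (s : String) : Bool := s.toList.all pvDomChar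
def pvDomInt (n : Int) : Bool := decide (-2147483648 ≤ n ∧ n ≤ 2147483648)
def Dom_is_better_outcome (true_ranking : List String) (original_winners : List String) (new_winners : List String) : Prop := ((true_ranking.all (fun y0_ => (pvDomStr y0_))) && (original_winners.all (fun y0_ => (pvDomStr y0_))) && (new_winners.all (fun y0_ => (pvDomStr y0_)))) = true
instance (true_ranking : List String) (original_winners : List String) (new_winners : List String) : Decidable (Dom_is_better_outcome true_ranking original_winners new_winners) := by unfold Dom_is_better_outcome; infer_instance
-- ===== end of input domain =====

-- B builds a set of the winners once and scans the ranking in preference order, stopping at the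
-- first winner; this replaces A's per-winner index lookup + min (faster: one pass over the ranking).

-- ===== PORT A =====
-- the generator 'true_ranking.index(w) for w in winners if w in true_ranking', as a list;
-- getD 0 is never taken: the filter guarantees membership, so index? is some
def pvPositions (r : List String) (ws : List String) : List Nat :=
  (ws.filter (fun w => r.contains w)).map (fun w => (PySem.List.index? r w).getD 0)

def is_better_outcome (true_ranking : List String) (original_winners : List String) (new_winners : List String) : Bool :=
  match PySem.List.min? (pvPositions true_ranking original_winners) (fun x => x),
        PySem.List.min? (pvPositions true_ranking new_winners) (fun x => x) with
  | some ob, some nb => decide (nb < ob)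
  | _, _ => false  -- Python raises ValueError here (min of empty); excluded by Pre_

-- ===== PORT B =====
-- the 'for position, candidate in enumerate(true_ranking): if candidate in members: return position' loop
def pvScan (members : PySem.Set String) (position : Nat) : List String → Option Nat
  | [] => none  -- Python raises ValueError here; excluded by Pre_
  | c :: rest => if PySem.Set.contains members c then some position else pvScan members (position + 1) rest

def is_better_outcome_alt (true_ranking : List String) (original_winners : List String) (new_winners : List String) : Bool :=
  match pvScan (PySem.Set.ofList original_winners) 0 true_ranking with
  | none => false  -- Python raises ValueError here; excluded by Pre_
  | some ob =>
    match pvScan (PySem.Set.ofList new_winners) 0 true_ranking with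
    | none => false
    | some nb => decide (nb < ob)

-- ===== PRECONDITION & SPEC =====
-- Pre_ excludes exactly the inputs where a winner set shares no candidate with true_ranking:
-- there Python A raises ValueError (min() of an empty sequence), and Python B raises ValueError too.
def Pre_is_better_outcome (true_ranking : List String) (original_winners : List String) (new_winners : List String) : Prop :=
  (∃ w ∈ original_winners, w ∈ true_ranking) ∧ (∃ w ∈ new_winners, w ∈ true_ranking)
instance (true_ranking : List String) (original_winners : List String) (new_winners : List String) : Decidable (Pre_is_better_outcome true_ranking original_winners new_winners) := by unfold Pre_is_better_outcome; infer_instance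

def pvWitness_is_better_outcome : List String × List String × List String :=
  (["a", "b", "c"], ["b", "z"], ["a"])

def Spec_is_better_outcome (true_ranking : List String) (original_winners : List String) (new_winners : List String) (out : Bool) : Prop := out = is_better_outcome_alt true_ranking original_winners new_winners
instance (true_ranking : List String) (original_winners : List String) (new_winners : List String) (out : Bool) : Decidable (Spec_is_better_outcome true_ranking original_winners new_winners out) := by unfold Spec_is_better_outcome; infer_instance

-- ===== CLAIM (what is proved, stated in full; the proofs are below) =====
def Claim_equal_is_better_outcome : Prop := ∀ (true_ranking : List String) (original_winners : List String) (new_winners : List String), Dom_is_better_outcome true_ranking original_winners new_winners → Pre_is_better_outcome true_ranking original_winners new_winners → Spec_is_better_outcome true_ranking original_winners new_winners (is_better_outcome true_ranking original_winners new_winners)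

-- ===== LEMMAS AND PROOFS =====

-- B's scan is findIdx: if some candidate of r is in the set, the scan returns offset + first hit index
theorem pvScan_eq_findIdx (s : PySem.Set String) (r : List String) (i : Nat)
    (h : ∃ c ∈ r, c ∈ s) :
    pvScan s i r = some (i + r.findIdx (fun c => PySem.Set.contains s c)) := by
  induction r generalizing i with
  | nil => obtain ⟨c, hc, _⟩ := h; exact absurd hc (List.not_mem_nil)
  | cons c rest ih =>
    by_cases hc : c ∈ s
    · simp [pvScan, List.findIdx_cons, hc]
    · have hrest : ∃ c' ∈ rest, c' ∈ s := by
        obtain ⟨c', hc', hs'⟩ := h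
        rcases List.mem_cons.mp hc' with rfl | h2
        · exact absurd hs' hc
        · exact ⟨c', h2, hs'⟩
      simp only [pvScan, List.findIdx_cons]
      simp only [PySem.Set.contains_eq_listContains] at *
      simp [hc, ih (i + 1) hrest]
      omega

-- A's min over winner indices is the same first hit index
theorem min?_pvPositions (r ws : List String) (h : ∃ w ∈ ws, w ∈ r) :
    PySem.List.min? (pvPositions r ws) (fun x => x)
      = some (r.findIdx (fun c => PySem.Set.contains (PySem.Set.ofList ws) c)) := by
  have hpiff : ∀ c, PySem.Set.contains (PySem.Set.ofList ws) c = true ↔ c ∈ ws := by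
    intro c
    rw [PySem.Set.contains_iff, PySem.Set.mem_ofList]
  set p : String → Bool := fun c => PySem.Set.contains (PySem.Set.ofList ws) c with hp
  set m := r.findIdx p with hm
  obtain ⟨w, hw, hwr⟩ := h
  have hex : ∃ c ∈ r, p c = true := ⟨w, hwr, (hpiff w).mpr hw⟩
  have hmlt : m < r.length := List.findIdx_lt_length_of_exists hex
  have hmhit : p (r[m]'hmlt) = true := List.findIdx_getElem (w := hmlt)
  have hnothit : ∀ j (hj : j < r.length), j < m → p (r[j]'hj) = false := by
    intro j hj hjm
    exact List.not_of_lt_findIdx hjm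
  -- every element of pvPositions is a hit index, hence ≥ m
  have hmemP : ∀ q ∈ pvPositions r ws, m ≤ q := by
    intro q hq
    simp only [pvPositions, List.mem_map, List.mem_filter] at hq
    obtain ⟨w', ⟨hw'ws, hw'r⟩, hq⟩ := hq
    have hw'mem : w' ∈ r := by simpa using hw'r
    obtain ⟨k, hk⟩ := Option.isSome_iff_exists.mp ((PySem.List.index?_isSome_iff r w').mpr hw'mem)
    rw [hk, Option.getD_some] at hq
    subst hq
    obtain ⟨hkl, hkeq, _⟩ := PySem.List.getElem_of_index?_eq_some hk
    rcases Nat.lt_or_ge k m with hlt | hge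
    · have := hnothit k hkl hlt
      rw [hkeq] at this
      simp only [hp] at this
      rw [(hpiff w').mpr hw'ws] at this
      exact absurd this (by simp)
    · exact hge
  -- m itself is an element of pvPositions
  have hmP : m ∈ pvPositions r ws := by
    have hrm : (r[m]'hmlt) ∈ ws := (hpiff _).mp hmhit
    have hrmr : (r[m]'hmlt) ∈ r := List.getElem_mem hmlt
    obtain ⟨k, hk⟩ := Option.isSome_iff_exists.mp ((PySem.List.index?_isSome_iff r _).mpr hrmr)
    obtain ⟨hkl, hkeq, hkmin⟩ := PySem.List.getElem_of_index?_eq_some hk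
    have hkle : k ≤ m := by
      rcases Nat.lt_or_ge m k with hgt | hge
      · exact absurd rfl (hkmin m hgt)
      · exact hge
    have hkge : m ≤ k := by
      rcases Nat.lt_or_ge k m with hlt | hge
      · have := hnothit k hkl hlt
        rw [hkeq] at this
        rw [hmhit] at this
        exact absurd this (by simp)
      · exact hge
    have hkm : k = m := le_antisymm hkle hkge
    simp only [pvPositions, List.mem_map, List.mem_filter]
    exact ⟨r[m]'hmlt, ⟨hrm, by simpa using hrmr⟩, by rw [hk, hkm]; rfl⟩
  -- pvPositions is nonempty, so min? is its minimum, which must be m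
  cases hmin : PySem.List.min? (pvPositions r ws) (fun x => x) with
  | none =>
      have : pvPositions r ws = [] := (PySem.List.min?_eq_none_iff _ _).mp hmin
      rw [this] at hmP
      exact absurd hmP (List.not_mem_nil)
  | some m0 =>
      have hm0mem := PySem.List.min?_mem hmin
      have hm0min := PySem.List.min?_isMin hmin
      exact congrArg some (le_antisymm (hm0min m hmP) (hmemP m0 hm0mem))

-- ===== VERDICT proof below =====

-- ===== VERDICT (by name: the statement is the Claim_ definition above) =====
theorem is_better_outcome_spec : Claim_equal_is_better_outcome := by
  intro tr ow nw _ hpre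
  obtain ⟨ho, hn⟩ := hpre
  have ho' : ∃ c ∈ tr, c ∈ PySem.Set.ofList ow := by
    obtain ⟨w, hw, hwr⟩ := ho
    exact ⟨w, hwr, (PySem.Set.mem_ofList _ _).mpr hw⟩
  have hn' : ∃ c ∈ tr, c ∈ PySem.Set.ofList nw := by
    obtain ⟨w, hw, hwr⟩ := hn
    exact ⟨w, hwr, (PySem.Set.mem_ofList _ _).mpr hw⟩
  unfold Spec_is_better_outcome is_better_outcome is_better_outcome_alt
  rw [min?_pvPositions tr ow ho, min?_pvPositions tr nw hn,
      pvScan_eq_findIdx _ _ 0 ho', pvScan_eq_findIdx _ _ 0 hn']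
  simp
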